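-- pv_equiv track=rewrite | github.com/thanhnguyen2187/random-problem-solving | online-test-01/task_3.py | solution
-- ===== SOURCE A (Python) =====
-- from collections import (
--     defaultdict,
--     deque,
--     Counter,
-- )
--
-- def solution(A: [int]):
--     counter = Counter(A)
--     values = sorted(counter.values(), reverse=True)
--     table = set()
--     for value in values:
--         while value in table and value > 0:
--             value -= 1
--         table.add(value)
--     table.discard(0)
--     return sum(values) - sum(table)
-- ===== SOURCE B (Python) =====
-- from collections import Counter
--
--
-- def solution(A: [int]):
--     counts = sorted(Counter(A).values(), reverse=True)
--     deletions = 0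
--     prev = counts[0] + 1 if counts else 0
--     for v in counts:
--         target = max(min(v, prev - 1), 0)
--         deletions += v - target
--         prev = target
--     return deletions
-- ===== Notes on version B (the rewrite author's own statement) =====
-- stated objective: simpler
-- what changed: Replaces A's membership set with inner decrement-while loop by a single pass over the descending counts that tracks one integer `prev` (the last assigned frequency) and sums deletions directly via target = max(min(v, prev-1), 0), so no set and no inner loop remain.
import Mathlib
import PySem

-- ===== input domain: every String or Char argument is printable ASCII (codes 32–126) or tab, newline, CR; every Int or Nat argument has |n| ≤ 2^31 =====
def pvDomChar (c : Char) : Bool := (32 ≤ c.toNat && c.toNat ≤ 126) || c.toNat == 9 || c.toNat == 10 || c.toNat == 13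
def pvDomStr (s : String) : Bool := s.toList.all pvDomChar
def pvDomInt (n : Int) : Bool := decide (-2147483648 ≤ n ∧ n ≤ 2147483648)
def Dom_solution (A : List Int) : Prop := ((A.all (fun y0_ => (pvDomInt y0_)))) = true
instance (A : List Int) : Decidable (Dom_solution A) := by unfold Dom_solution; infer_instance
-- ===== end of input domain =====

-- B replaces A's set + inner decrement-while loop by a single pass over the
-- descending counts tracking one integer `prev`; objective: simpler.

-- ===== PORT A =====
-- 'while value in table and value > 0: value -= 1'
def solBump (table : PySem.Set Int) (value : Int) : Int :=
  if h : value ∈ table ∧ 0 < value then solBump table (value - 1) else value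
termination_by value.toNat
decreasing_by
  omega

def solution (A : List Int) : Int :=
  let values := PySem.List.sorted (PySem.Dict.values (PySem.Dict.counter A)) (fun x => x) true
  let table := values.foldl (fun t v => PySem.Set.add t (solBump t v)) PySem.Set.empty
  values.sum - (PySem.Set.discard table 0).sum

-- ===== PORT B =====
def solution_alt (A : List Int) : Int :=
  let counts := PySem.List.sorted (PySem.Dict.values (PySem.Dict.counter A)) (fun x => x) true
  let prev0 : Int := match counts with | [] => 0 | v :: _ => v + 1
  (counts.foldl
    (fun (s : Int × Int) v =>
      (max (min v (s.1 - 1)) 0, s.2 + (v - max (min v (s.1 - 1)) 0)))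
    (prev0, 0)).2

-- ===== PRECONDITION & SPEC =====
def Spec_solution (A : List Int) (out : Int) : Prop := out = solution_alt A
instance (A : List Int) (out : Int) : Decidable (Spec_solution A out) := by unfold Spec_solution; infer_instance

-- ===== CLAIM (what is proved, stated in full; the proofs are below) =====
def Claim_equal_solution : Prop := ∀ (A : List Int), Dom_solution A → Spec_solution A (solution A)

-- ===== LEMMAS AND PROOFS =====

lemma mem_add_iff_pv (s : PySem.Set Int) (x y : Int) :
    y ∈ PySem.Set.add s x ↔ y ∈ s ∨ y = x := by
  unfold PySem.Set.add
  split_ifs with hc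
  · constructor
    · exact Or.inl
    · rintro (h | rfl)
      · exact h
      · exact (PySem.Set.contains_iff s y).mp hc
  · simp

-- A's while loop lands exactly on B's clamped target, given the table invariant.
lemma solBump_eq (table : PySem.Set Int) (prev hi : Int) (hprev : 0 ≤ prev)
    (hmem : ∀ x : Int, prev ≤ x → x ≤ hi → x ∈ table)
    (hlow : ∀ x ∈ table, x = 0 ∨ prev ≤ x) :
    ∀ v : Int, 0 ≤ v → v ≤ hi → solBump table v = max (min v (prev - 1)) 0 := by
  have H : ∀ (n : Nat) (v : Int), v.toNat ≤ n → 0 ≤ v → v ≤ hi →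
      solBump table v = max (min v (prev - 1)) 0 := by
    intro n
    induction n with
    | zero =>
      intro v hn h0 hhi
      have hv : v = 0 := by omega
      subst hv
      rw [solBump]
      simp only [lt_irrefl, and_false, dite_false]
      omega
    | succ n ih =>
      intro v hn h0 hhi
      rw [solBump]
      split_ifs with h
      · obtain ⟨hvt, hvpos⟩ := h
        have hge : prev ≤ v := by
          rcases hlow v hvt with h0' | h'
          · omega
          · exact h'
        rw [ih (v - 1) (by omega) (by omega) (by omega)]
        omega
      · rw [Decidable.not_and_iff_or_not] at h
        rcases h with h | h
        · have hvpos : 0 < v ∨ v = 0 := by omega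
          rcases hvpos with hvpos | rfl
          · have hlt : v < prev := by
              by_contra hge
              exact h (hmem v (by omega) hhi)
            omega
          · omega
        · have hv : v = 0 := by omega
          subst hv
          omega
  intro v
  exact H v.toNat v le_rfl

lemma discard_add_sum (table : PySem.Set Int) (t : Int) (ht : 0 ≤ t)
    (hnot : 0 < t → t ∉ table) :
    (PySem.Set.discard (PySem.Set.add table t) 0).sum
      = (PySem.Set.discard table 0).sum + t := by
  unfold PySem.Set.add PySem.Set.discard
  by_cases h0 : t = 0
  · subst h0
    split_ifs with hc
    · omega
    · rw [List.filter_append]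
      simp
  · have hne : t ∉ table := hnot (by omega)
    have hcf : ¬ (PySem.Set.contains table t = true) := fun hc =>
      hne ((PySem.Set.contains_iff table t).mp hc)
    rw [if_neg hcf]
    rw [List.filter_append, List.sum_append]
    have hb : (t == (0 : Int)) = false := by simp [h0]
    simp [List.filter, hb]

-- Invariant-carrying loop correspondence between A's fold over the table and
-- B's fold over (prev, acc).
lemma loop_eq (vs : List Int) :
    ∀ (table : PySem.Set Int) (prev acc hi : Int),
    0 ≤ prev →
    (∀ v ∈ vs, 0 ≤ v ∧ v ≤ hi) →
    vs.Pairwise (fun a b => b ≤ a) →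
    (∀ x : Int, prev ≤ x → x ≤ hi → x ∈ table) →
    (∀ x ∈ table, x = 0 ∨ prev ≤ x) →
    (PySem.Set.discard (vs.foldl (fun t v => PySem.Set.add t (solBump t v)) table) 0).sum
      = (PySem.Set.discard table 0).sum + vs.sum + acc
        - (vs.foldl
            (fun (s : Int × Int) v =>
              (max (min v (s.1 - 1)) 0, s.2 + (v - max (min v (s.1 - 1)) 0)))
            (prev, acc)).2 := by
  induction vs with
  | nil =>
    intro table prev acc hi _ _ _ _ _
    simp
  | cons v rest ih =>
    intro table prev acc hi hprev hvs hpw hmem hlow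
    obtain ⟨hv0, hvhi⟩ := hvs v (List.mem_cons_self ..)
    have hb : solBump table v = max (min v (prev - 1)) 0 :=
      solBump_eq table prev hi hprev hmem hlow v hv0 hvhi
    set t : Int := max (min v (prev - 1)) 0 with htdef
    have ht0 : 0 ≤ t := le_max_right _ _
    have hnotin : 0 < t → t ∉ table := by
      intro htp hmemt
      rcases hlow t hmemt with h | h
      · omega
      · omega
    have hsum := discard_add_sum table t ht0 hnotin
    simp only [List.foldl_cons, hb]
    rw [ih (PySem.Set.add table t) t (acc + (v - t)) v ht0
      (fun w hw => ⟨(hvs w (List.mem_cons_of_mem _ hw)).1,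
        (List.pairwise_cons.mp hpw).1 w hw⟩)
      ((List.pairwise_cons.mp hpw).2)
      (by
        intro x hx1 hx2
        by_cases hxt : x = t
        · subst hxt
          exact (mem_add_iff_pv table t t).mpr (Or.inr rfl)
        · have hpx : prev ≤ x := by omega
          exact (mem_add_iff_pv table t x).mpr
            (Or.inl (hmem x hpx (le_trans hx2 hvhi))))
      (by
        intro x hx
        rcases (mem_add_iff_pv table t x).mp hx with hx' | rfl
        · rcases hlow x hx' with h | h
          · exact Or.inl h
          · exact Or.inr (by omega)
        · exact Or.inr le_rfl)]
    rw [hsum]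
    have harith : ∀ s1 s2 s3 : Int,
        s1 + t + s2 + (acc + (v - t)) - s3 = s1 + (v + s2) + acc - s3 := by
      intro s1 s2 s3; ring
    simp only [List.sum_cons]
    apply harith

lemma values_counter_nonneg {A : List Int} {v : Int}
    (h : v ∈ PySem.Dict.values (PySem.Dict.counter A)) : 0 ≤ v := by
  simp only [PySem.Dict.values, PySem.Dict.items_counter, List.map_map,
    List.mem_map, Function.comp] at h
  obtain ⟨k, _, hv⟩ := h
  subst hv
  exact Int.natCast_nonneg _

lemma solution_eq (A : List Int) : solution A = solution_alt A := by
  simp only [solution, solution_alt]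
  rcases h : PySem.List.sorted (PySem.Dict.values (PySem.Dict.counter A)) (fun x => x) true
    with _ | ⟨v0, rest⟩
  · simp [PySem.Set.discard, PySem.Set.empty]
  · have hnn : ∀ v ∈ (v0 :: rest), (0 : Int) ≤ v := by
      intro v hv
      have : v ∈ PySem.List.sorted (PySem.Dict.values (PySem.Dict.counter A)) (fun x => x) true := by
        rw [h]; exact hv
      rw [PySem.List.mem_sorted] at this
      exact values_counter_nonneg this
    have hhead : ∀ v ∈ (v0 :: rest), v ≤ v0 := by
      intro v hv
      have hv' : v ∈ PySem.List.sorted (PySem.Dict.values (PySem.Dict.counter A)) (fun x => x) true := by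
        rw [h]; exact hv
      rw [PySem.List.mem_sorted] at hv'
      exact PySem.List.key_head_sorted_rev_ge _ _ h v hv'
    have hpw : (v0 :: rest).Pairwise (fun a b : Int => b ≤ a) := by
      rw [← h]
      exact PySem.List.sorted_pairwise_rev _ _
    have hmain := loop_eq (v0 :: rest) PySem.Set.empty (v0 + 1) 0 v0
      (by have := hnn v0 (List.mem_cons_self ..); omega)
      (fun w hw => ⟨hnn w hw, hhead w hw⟩)
      hpw
      (by intro x h1 h2; exact absurd h2 (by omega))
      (by intro x hx; simp [PySem.Set.empty] at hx)
    simp only [PySem.Set.discard, PySem.Set.empty, List.filter_nil, List.sum_nil] at hmain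
    simp only [PySem.Set.discard, PySem.Set.empty]
    show (v0 :: rest).sum
        - (List.filter (fun y => !y == 0)
            ((v0 :: rest).foldl (fun t v => PySem.Set.add t (solBump t v)) ([] : List Int))).sum
      = ((v0 :: rest).foldl
          (fun (s : Int × Int) v =>
            (max (min v (s.1 - 1)) 0, s.2 + (v - max (min v (s.1 - 1)) 0)))
          (v0 + 1, 0)).2
    linarith [hmain]

-- ===== VERDICT (by name: the statement is the Claim_ definition above) =====
theorem solution_spec : Claim_equal_solution := by
  intro A _
  unfold Spec_solution
  exact solution_eq A
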